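-- pv_equiv track=rewrite | github.com/anoopbabu29/DLFL | exp_algos/algorithm3.py | init_tape
-- ===== SOURCE A (Python) =====
-- from typing import List, Dict, Tuple, Callable, Iterable, Any
--
-- def init_tape(episode: List[Tuple[str, str, str]], is_final: bool) -> List[str]:
--     tape: List[str] = []
--
--     if episode != []:
--         tape.append(episode[0][0])
--
--     for part in episode:
--         tape.append(part[1])
--         if not is_final and part[1] == 'a2':
--             break
--         tape.append(part[2])
--
--     return tape
-- ===== SOURCE B (Python) =====
-- from typing import List, Tuple
--
-- def init_tape(episode: List[Tuple[str, str, str]], is_final: bool) -> List[str]: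
--     # Precompute the cutoff index instead of testing 'a2' inside the build loop.
--     if is_final:
--         k = None
--     else:
--         k = next((i for i, p in enumerate(episode) if p[1] == 'a2'), None)
--     head = [episode[0][0]] if episode else []
--     full = episode if k is None else episode[:k]
--     tape = head + [s for p in full for s in (p[1], p[2])]
--     if k is not None:
--         tape.append(episode[k][1])
--     return tape
-- ===== Notes on version B (the rewrite author's own statement) =====
-- stated objective: alternative
-- what changed: B first computes the cutoff index (first part whose middle field is 'a2' when not is_final), then builds the tape in one index-driven pass: head element, a flatMap over the fully-included prefix, and the single cutoff action appended, instead of A's loop that tests 'a2' and breaks mid-iteration.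
import Mathlib
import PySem

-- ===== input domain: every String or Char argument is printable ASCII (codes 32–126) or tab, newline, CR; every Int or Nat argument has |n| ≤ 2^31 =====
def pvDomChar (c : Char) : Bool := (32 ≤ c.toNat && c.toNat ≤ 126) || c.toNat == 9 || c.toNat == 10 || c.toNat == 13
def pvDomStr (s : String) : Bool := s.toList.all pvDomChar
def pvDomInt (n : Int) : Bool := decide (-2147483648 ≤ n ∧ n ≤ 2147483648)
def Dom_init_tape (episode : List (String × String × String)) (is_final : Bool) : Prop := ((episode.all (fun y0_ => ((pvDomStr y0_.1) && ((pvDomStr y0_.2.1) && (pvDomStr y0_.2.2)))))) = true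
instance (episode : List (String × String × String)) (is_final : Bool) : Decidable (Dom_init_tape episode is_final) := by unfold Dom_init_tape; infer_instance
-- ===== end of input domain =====

-- B builds the tape from a precomputed cutoff index (first 'a2' part when not final) instead of A's break-inside-loop; objective: alternative decomposition, same cost.


-- ===== PORT A =====
-- the for-loop with its break, as structural recursion over the same state
def init_tape_loop (is_final : Bool) : List (String × String × String) → List String
  | [] => []
  | p :: rest =>
    if !is_final && p.2.1 == "a2" then [p.2.1]
    else p.2.1 :: p.2.2 :: init_tape_loop is_final rest

def init_tape (episode : List (String × String × String)) (is_final : Bool) : List String :=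
  (match episode with
   | [] => []
   | p :: _ => [p.1]) ++ init_tape_loop is_final episode

-- ===== PORT B =====
def init_tape_alt (episode : List (String × String × String)) (is_final : Bool) : List String :=
  let k : Option Nat :=
    if is_final then none else episode.findIdx? (fun p => p.2.1 == "a2")
  let head : List String :=
    match episode with
    | [] => []
    | p :: _ => [p.1]
  let full : List (String × String × String) :=
    match k with
    | none => episode
    | some i => episode.take i
  let tape := head ++ full.flatMap (fun p => [p.2.1, p.2.2])
  match k with
  | none => tape
  | some i =>
    tape ++ (match episode[i]? with
             | some p => [p.2.1]
             | none => [])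

-- ===== PRECONDITION & SPEC =====
def Spec_init_tape (episode : List (String × String × String)) (is_final : Bool) (out : List String) : Prop := out = init_tape_alt episode is_final
instance (episode : List (String × String × String)) (is_final : Bool) (out : List String) : Decidable (Spec_init_tape episode is_final out) := by unfold Spec_init_tape; infer_instance

-- ===== CLAIM (what is proved, stated in full; the proofs are below) =====
def Claim_equal_init_tape : Prop := ∀ (episode : List (String × String × String)) (is_final : Bool), Dom_init_tape episode is_final → Spec_init_tape episode is_final (init_tape episode is_final)

-- ===== LEMMAS AND PROOFS =====
-- A's loop tail equals B's index-driven tail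
theorem init_tape_tail_eq (is_final : Bool) (episode : List (String × String × String)) :
    init_tape_loop is_final episode =
      (match (if is_final then none else episode.findIdx? (fun p => p.2.1 == "a2")) with
       | none => episode.flatMap (fun p => [p.2.1, p.2.2])
       | some i => (episode.take i).flatMap (fun p => [p.2.1, p.2.2]) ++
           (match episode[i]? with
            | some p => [p.2.1]
            | none => [])) := by
  induction episode with
  | nil => cases is_final <;> simp [init_tape_loop]
  | cons p rest ih =>
    cases is_final with
    | true => simpa [init_tape_loop, List.flatMap_cons] using ih
    | false =>
      by_cases h : p.2.1 = "a2"
      · simp [init_tape_loop, List.findIdx?_cons, h]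
      · have h' : (p.2.1 == "a2") = false := by simpa using h
        simp only [init_tape_loop, List.findIdx?_cons, h', Bool.not_false, Bool.true_and,
          if_false, Bool.false_eq_true] at *
        rw [ih]
        cases hk : rest.findIdx? (fun p => p.2.1 == "a2") with
        | none => simp [List.flatMap_cons]
        | some i => simp [List.flatMap_cons]

-- ===== VERDICT (by name: the statement is the Claim_ definition above) =====
theorem init_tape_spec : Claim_equal_init_tape := by
  intro episode is_final _
  unfold Spec_init_tape init_tape init_tape_alt
  rw [init_tape_tail_eq]
  cases hk : (if is_final then none else episode.findIdx? (fun p => p.2.1 == "a2")) with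
  | none => simp
  | some i => simp
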